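-- pv_equiv track=rewrite | github.com/mohantyk/bioinformatics | course_3/week5.py | cycles_in_genome_graph
-- ===== SOURCE A (Python) =====
-- def cycles_in_genome_graph(edges):
--     cycles = []
--     end_node = None
--     for edge in edges:
--         if end_node is None:
--             cycle = []
--             start_node = edge[0]
--             if start_node%2 == 0:
--                 end_node = start_node - 1
--             else:
--                 end_node = start_node + 1
--         cycle.append(edge)
--         if edge[-1] == end_node:
--             end_node = None
--             cycles.append(cycle)
--     return cycles
-- ===== SOURCE B (Python) =====
-- def cycles_in_genome_graph(edges):
--     cycles = []
--     rest = edges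
--     while rest:
--         start_node = rest[0][0]
--         end_node = start_node - 1 if start_node % 2 == 0 else start_node + 1
--         for j, edge in enumerate(rest):
--             if edge[-1] == end_node:
--                 cycles.append(rest[:j + 1])
--                 rest = rest[j + 1:]
--                 break
--         else:
--             break
--     return cycles
-- ===== Notes on version B (the rewrite author's own statement) =====
-- stated objective: alternative
-- what changed: Replaces the flag-driven single loop that grows a cycle edge by edge with a slice-based splitter: find the index of the closing edge for the current block, slice that whole block off as a cycle, and repeat on the remainder (an unterminated trailing block is simply never sliced off).
import Mathlib
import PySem

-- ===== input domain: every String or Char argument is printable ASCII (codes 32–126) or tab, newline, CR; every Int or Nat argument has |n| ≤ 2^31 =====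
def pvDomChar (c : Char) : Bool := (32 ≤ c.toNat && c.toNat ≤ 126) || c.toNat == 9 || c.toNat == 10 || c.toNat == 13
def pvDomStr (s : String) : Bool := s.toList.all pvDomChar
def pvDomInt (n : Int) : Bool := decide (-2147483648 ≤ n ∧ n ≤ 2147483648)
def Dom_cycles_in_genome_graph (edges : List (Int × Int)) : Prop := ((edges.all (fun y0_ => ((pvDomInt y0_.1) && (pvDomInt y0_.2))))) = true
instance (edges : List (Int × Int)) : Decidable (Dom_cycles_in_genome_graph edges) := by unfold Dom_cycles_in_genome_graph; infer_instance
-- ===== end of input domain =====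

-- B replaces A's flag-driven single loop with a slice-based splitter (find the closing edge, slice the block off, recurse); alternative decomposition, same cost.


-- ===== PORT A =====
-- A's single for-loop with state (cycles, end_node : Option Int, cycle)
def pvAStep (st : List (List (Int × Int)) × Option Int × List (Int × Int))
    (edge : Int × Int) : List (List (Int × Int)) × Option Int × List (Int × Int) :=
  let (cycles, endNode, cycle) := st
  let (cycle, endNode) :=
    match endNode with
    | none =>
        let startNode := edge.1
        (([] : List (Int × Int)),
         if PySem.Int.mod startNode 2 = 0 then some (startNode - 1) else some (startNode + 1))
    | some e => (cycle, some e)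
  let cycle := cycle ++ [edge]
  if some edge.2 = endNode then (cycles ++ [cycle], none, cycle)
  else (cycles, endNode, cycle)

def cycles_in_genome_graph (edges : List (Int × Int)) : List (List (Int × Int)) :=
  (edges.foldl pvAStep ([], none, [])).1

-- ===== PORT B =====
-- index of the first edge in l whose last element equals endNode (B's inner for/enumerate loop)
def pvFindClose (endNode : Int) : List (Int × Int) → Option Nat
  | [] => none
  | e :: t => if e.2 = endNode then some 0 else (pvFindClose endNode t).map (· + 1)

lemma pvFindClose_drop_lt (e : Int × Int) (t : List (Int × Int)) (j : Nat) :
    ((e :: t).drop (j + 1)).length < (e :: t).length := by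
  simp

-- B's outer while-loop on the remaining suffix
def cycles_in_genome_graph_alt : List (Int × Int) → List (List (Int × Int))
  | [] => []
  | e :: t =>
      let startNode := e.1
      let endNode := if PySem.Int.mod startNode 2 = 0 then startNode - 1 else startNode + 1
      match pvFindClose endNode (e :: t) with
      | none => []
      | some j => (e :: t).take (j + 1) :: cycles_in_genome_graph_alt ((e :: t).drop (j + 1))
termination_by edges => edges.length
decreasing_by exact pvFindClose_drop_lt e t j

-- ===== PRECONDITION & SPEC =====
def Spec_cycles_in_genome_graph (edges : List (Int × Int)) (out : List (List (Int × Int))) : Prop := out = cycles_in_genome_graph_alt edges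
instance (edges : List (Int × Int)) (out : List (List (Int × Int))) : Decidable (Spec_cycles_in_genome_graph edges out) := by unfold Spec_cycles_in_genome_graph; infer_instance

-- ===== CLAIM (what is proved, stated in full; the proofs are below) =====
def Claim_equal_cycles_in_genome_graph : Prop := ∀ (edges : List (Int × Int)), Dom_cycles_in_genome_graph edges → Spec_cycles_in_genome_graph edges (cycles_in_genome_graph edges)

-- ===== LEMMAS AND PROOFS =====

-- A's step from an open state (end_node = some e)
lemma pvAStep_some (cs : List (List (Int × Int))) (e : Int) (c : List (Int × Int)) (x : Int × Int) :
    pvAStep (cs, some e, c) x =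
      if x.2 = e then (cs ++ [c ++ [x]], none, c ++ [x]) else (cs, some e, c ++ [x]) := by
  by_cases hx : x.2 = e <;> simp [pvAStep, hx]

-- A's step from a closed state (end_node = None)
lemma pvAStep_none (cs : List (List (Int × Int))) (c : List (Int × Int)) (x : Int × Int)
    (en : Int) (hen : en = if PySem.Int.mod x.1 2 = 0 then x.1 - 1 else x.1 + 1) :
    pvAStep (cs, none, c) x =
      if x.2 = en then (cs ++ [[x]], none, [x]) else (cs, some en, [x]) := by
  subst hen
  by_cases hm : PySem.Int.mod x.1 2 = 0
  · rw [if_pos hm]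
    by_cases hx : x.2 = x.1 - 1 <;> simp only [pvAStep, hm, hx, if_true, if_false] <;> simp [hx]
  · rw [if_neg hm]
    by_cases hx : x.2 = x.1 + 1 <;> simp only [pvAStep, hm, hx, if_true, if_false] <;> simp [hx]

-- scanning with a fixed open cycle: A's fold reaches the closing edge found by pvFindClose
lemma pvAux (l : List (Int × Int)) :
    ∀ (e : Int) (c : List (Int × Int)) (cs : List (List (Int × Int))),
    (l.foldl pvAStep (cs, some e, c)).1 =
      match pvFindClose e l with
      | none => cs
      | some j => (((l.drop (j + 1)).foldl pvAStep
          (cs ++ [c ++ l.take (j + 1)], none, c ++ l.take (j + 1)))).1 := by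
  induction l with
  | nil => intro e c cs; simp [pvFindClose]
  | cons x t ih =>
      intro e c cs
      by_cases hx : x.2 = e
      · simp [pvFindClose, hx, pvAStep_some]
      · rw [List.foldl_cons, pvAStep_some, if_neg hx, ih]
        simp only [pvFindClose, hx, if_false]
        cases h : pvFindClose e t with
        | none => simp
        | some j => simp

-- the main invariant: A's fold from a closed state produces cs ++ B's result
lemma pvMain : ∀ (n : Nat) (l : List (Int × Int)), l.length ≤ n →
    ∀ (cs : List (List (Int × Int))) (c : List (Int × Int)),
    (l.foldl pvAStep (cs, none, c)).1 = cs ++ cycles_in_genome_graph_alt l := by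
  intro n
  induction n with
  | zero =>
      intro l hl cs c
      have : l = [] := List.length_eq_zero_iff.mp (Nat.le_zero.mp hl)
      subst this; simp [cycles_in_genome_graph_alt]
  | succ n ih =>
      intro l hl cs c
      match l with
      | [] => simp [cycles_in_genome_graph_alt]
      | x :: t =>
          have ht : t.length ≤ n := by simpa using Nat.succ_le_succ_iff.mp hl
          rw [List.foldl_cons,
              pvAStep_none cs c x (if PySem.Int.mod x.1 2 = 0 then x.1 - 1 else x.1 + 1) rfl,
              cycles_in_genome_graph_alt]
          set en : Int := if PySem.Int.mod x.1 2 = 0 then x.1 - 1 else x.1 + 1 with hen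
          by_cases hx : x.2 = en
          · -- the first edge itself closes the cycle
            rw [if_pos hx, ih t ht]
            simp [pvFindClose, hx]
          · rw [if_neg hx, pvAux]
            simp only [pvFindClose, hx, if_false]
            cases h : pvFindClose en t with
            | none => simp
            | some j =>
                simp only [Option.map_some, List.drop_succ_cons, List.take_succ_cons]
                have hlen : (t.drop (j + 1)).length ≤ n := by
                  have := List.length_drop (l := t) (i := j + 1); omega
                rw [ih (t.drop (j + 1)) hlen]
                simp

-- ===== VERDICT (by name: the statement is the Claim_ definition above) =====
theorem cycles_in_genome_graph_spec : Claim_equal_cycles_in_genome_graph := by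
  intro edges _
  unfold Spec_cycles_in_genome_graph cycles_in_genome_graph
  simpa using pvMain edges.length edges le_rfl [] []
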